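-- pv_equiv track=rewrite | github.com/CH-YYK/leetcode-cpp | 0. Templates/Problem-sorting/Sorting-Bubbles/bubble.py | maxAtEnd
-- ===== SOURCE A (Python) =====
-- def maxAtEnd(arr):
--     if len(arr) <= 1:
--         return arr
--     else:
--         if arr[0] > arr[1]:
--             return [arr[1]] + maxAtEnd([arr[0]] + arr[2:])
--         else:
--             return [arr[0]] + maxAtEnd(arr[1:])
-- ===== SOURCE B (Python) =====
-- def maxAtEnd(arr):
--     if not arr:
--         return arr
--     it = iter(arr)
--     carry = next(it)
--     out = []
--     for x in it:
--         if carry > x: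
--             out.append(x)
--         else:
--             out.append(carry)
--             carry = x
--     out.append(carry)
--     return out
-- ===== Notes on version B (the rewrite author's own statement) =====
-- stated objective: faster
-- what changed: Replaces A's recursion with list slicing/concatenation at every step by a single iterative pass that carries the running maximum forward and emits the smaller element, no slicing.
import Mathlib
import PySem

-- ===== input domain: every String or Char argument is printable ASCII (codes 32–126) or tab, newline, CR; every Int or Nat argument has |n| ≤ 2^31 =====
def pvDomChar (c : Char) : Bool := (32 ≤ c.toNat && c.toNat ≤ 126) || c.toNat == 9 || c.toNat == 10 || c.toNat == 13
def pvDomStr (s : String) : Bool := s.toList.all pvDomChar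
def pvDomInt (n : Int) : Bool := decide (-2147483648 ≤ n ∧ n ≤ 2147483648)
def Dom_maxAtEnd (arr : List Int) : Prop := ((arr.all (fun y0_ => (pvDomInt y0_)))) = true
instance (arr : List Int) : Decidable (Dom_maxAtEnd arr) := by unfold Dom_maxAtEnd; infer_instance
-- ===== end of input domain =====

-- ===== PORT A =====
-- B: one iterative pass carrying the running maximum, instead of A's recursion with slicing.
def maxAtEnd (arr : List Int) : List Int :=
  match arr with
  | [] => arr                      -- len(arr) <= 1
  | [_] => arr
  | a :: b :: rest =>
    if a > b then b :: maxAtEnd (a :: rest)   -- [arr[1]] + maxAtEnd([arr[0]] + arr[2:])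
    else a :: maxAtEnd (b :: rest)            -- [arr[0]] + maxAtEnd(arr[1:])
termination_by arr.length

-- ===== PORT B =====
-- loop of Source B: state (carry, out); out.append via ++ [x]
def maxAtEndLoop (carry : Int) (out : List Int) : List Int → List Int
  | [] => out ++ [carry]
  | x :: xs => if carry > x then maxAtEndLoop carry (out ++ [x]) xs
               else maxAtEndLoop x (out ++ [carry]) xs

def maxAtEnd_alt (arr : List Int) : List Int :=
  match arr with
  | [] => arr
  | carry :: rest => maxAtEndLoop carry [] rest

-- ===== PRECONDITION & SPEC =====
def Spec_maxAtEnd (arr : List Int) (out : List Int) : Prop := out = maxAtEnd_alt arr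
instance (arr : List Int) (out : List Int) : Decidable (Spec_maxAtEnd arr out) := by unfold Spec_maxAtEnd; infer_instance

-- ===== CLAIM (what is proved, stated in full; the proofs are below) =====
def Claim_equal_maxAtEnd : Prop := ∀ (arr : List Int), Dom_maxAtEnd arr → Spec_maxAtEnd arr (maxAtEnd arr)

-- ===== LEMMAS AND PROOFS =====
theorem maxAtEndLoop_eq (xs : List Int) : ∀ (carry : Int) (out : List Int),
    maxAtEndLoop carry out xs = out ++ maxAtEnd (carry :: xs) := by
  induction xs with
  | nil => intro carry out; simp [maxAtEndLoop, maxAtEnd]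
  | cons x xs ih =>
    intro carry out
    by_cases h : carry > x
    · simp [maxAtEndLoop, maxAtEnd, h, ih]
    · simp [maxAtEndLoop, maxAtEnd, h, ih]

-- ===== VERDICT (by name: the statement is the Claim_ definition above) =====
theorem maxAtEnd_spec : Claim_equal_maxAtEnd := by
  intro arr _
  unfold Spec_maxAtEnd
  cases arr with
  | nil => simp [maxAtEnd, maxAtEnd_alt]
  | cons a rest => simp [maxAtEnd_alt, maxAtEndLoop_eq]
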